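-- pv_equiv track=rewrite | github.com/Rakesh-005/GFG | Difficulty: Medium/Special Numbers/special-numbers.py | getSpecialNumber
-- ===== SOURCE A (Python) =====
-- def getSpecialNumber(n):
--     n -= 1  # adjust for 0-based indexing
--     if n < 0:
--         return 0
--     result = ""
--     while n > 0:
--         result = str(n % 6) + result
--         n //= 6
--     return int(result) if result else 0
-- ===== SOURCE B (Python) =====
-- def getSpecialNumber(n):
--     n -= 1  # adjust for 0-based indexing
--     if n <= 0:
--         return 0
--     # largest power of 6 not exceeding n
--     p = 1
--     while p * 6 <= n:
--         p *= 6
--     # extract base-6 digits most-significant-first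
--     parts = []
--     while p > 0:
--         parts.append(str(n // p))
--         n %= p
--         p //= 6
--     return int("".join(parts))
-- ===== Notes on version B (the rewrite author's own statement) =====
-- stated objective: alternative
-- what changed: Instead of building the digit string least-significant-first by repeated string prepending, B finds the largest power of the base not exceeding the decremented index and extracts the digits most-significant-first, joining them once at the end.
import Mathlib
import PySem

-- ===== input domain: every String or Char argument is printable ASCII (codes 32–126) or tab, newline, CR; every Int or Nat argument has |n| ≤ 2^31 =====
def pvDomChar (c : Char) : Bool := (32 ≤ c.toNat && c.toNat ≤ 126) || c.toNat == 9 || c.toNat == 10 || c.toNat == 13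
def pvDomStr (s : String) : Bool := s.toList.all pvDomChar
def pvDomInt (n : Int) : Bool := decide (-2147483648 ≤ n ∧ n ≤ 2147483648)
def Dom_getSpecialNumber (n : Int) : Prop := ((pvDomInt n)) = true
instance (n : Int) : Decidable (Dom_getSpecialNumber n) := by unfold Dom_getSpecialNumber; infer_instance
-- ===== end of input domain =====

-- B replaces A's least-significant-first string prepending with most-significant-first
-- digit extraction via a precomputed base power and a single join (alternative decomposition).


-- ===== PORT A =====
-- while n > 0: result = str(n % 6) + result; n //= 6   (string kept as List Char)
def aLoop (n : Int) (result : List Char) : List Char :=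
  if h : 0 < n then
    aLoop (PySem.Int.floordiv n 6) (PySem.Int.toChars (PySem.Int.mod n 6) ++ result)
  else result
termination_by n.toNat
decreasing_by
  have h6 : PySem.Int.floordiv n 6 = n / 6 := PySem.Int.floordiv_eq_ediv_of_pos (by norm_num)
  omega

def getSpecialNumber (n : Int) : Int :=
  let m := n - 1            -- n -= 1
  if m < 0 then 0
  else
    let result := aLoop m []
    -- int(result) if result else 0 ; ofChars? is never none here: result is all digits
    if result ≠ [] then (PySem.Int.ofChars? result).getD 0 else 0

-- ===== PORT B =====
-- while p * 6 <= n: p *= 6   (0 < p is a loop invariant, carried for termination)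
def powLoop (p n : Int) (hp : 0 < p) : Int :=
  if p * 6 ≤ n then powLoop (p * 6) n (by omega) else p
termination_by (n + 1 - p).toNat
decreasing_by omega

-- while p > 0: parts.append(str(n // p)); n %= p; p //= 6
def extractLoop (p n : Int) (parts : List (List Char)) : List (List Char) :=
  if h : 0 < p then
    extractLoop (PySem.Int.floordiv p 6) (PySem.Int.mod n p)
      (parts ++ [PySem.Int.toChars (PySem.Int.floordiv n p)])
  else parts
termination_by p.toNat
decreasing_by
  have h6 : PySem.Int.floordiv p 6 = p / 6 := PySem.Int.floordiv_eq_ediv_of_pos (by norm_num)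
  omega

def getSpecialNumber_alt (n : Int) : Int :=
  let m := n - 1            -- n -= 1
  if m ≤ 0 then 0
  else
    let p := powLoop 1 m (by norm_num)
    let parts := extractLoop p m []
    -- int("".join(parts)) ; ofChars? is never none here: parts is nonempty digits
    (PySem.Int.ofChars? parts.flatten).getD 0

-- ===== PRECONDITION & SPEC =====
def Spec_getSpecialNumber (n : Int) (out : Int) : Prop := out = getSpecialNumber_alt n
instance (n : Int) (out : Int) : Decidable (Spec_getSpecialNumber n out) := by unfold Spec_getSpecialNumber; infer_instance

-- ===== CLAIM (what is proved, stated in full; the proofs are below) =====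
def Claim_equal_getSpecialNumber : Prop := ∀ (n : Int), Dom_getSpecialNumber n → Spec_getSpecialNumber n (getSpecialNumber n)

-- ===== LEMMAS AND PROOFS =====

-- canonical base-6 digit string of a natural number (empty for 0)
def rep (m : Nat) : List Char :=
  if h : m = 0 then [] else rep (m / 6) ++ PySem.Int.toChars ((m % 6 : Nat) : Int)
termination_by m
decreasing_by exact Nat.div_lt_self (Nat.pos_of_ne_zero h) (by norm_num)

-- zero-padded base-6 digit string of m with exactly k+1 digits (m < 6^(k+1))
def padRep : Nat → Nat → List Char
  | 0, m => PySem.Int.toChars (m : Int)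
  | k + 1, m => PySem.Int.toChars ((m / 6 ^ (k + 1) : Nat) : Int) ++ padRep k (m % 6 ^ (k + 1))

theorem aLoop_eq_rep (a : Nat) : ∀ s : List Char, aLoop (a : Int) s = rep a ++ s := by
  induction a using Nat.strong_induction_on with
  | _ a ih =>
    intro s
    rcases Nat.eq_zero_or_pos a with h0 | hpos
    · subst h0
      rw [aLoop, rep]
      simp
    · rw [aLoop, rep]
      rw [dif_pos (by exact_mod_cast hpos), dif_neg (Nat.pos_iff_ne_zero.mp hpos)]
      have hf : PySem.Int.floordiv (a : Int) 6 = ((a / 6 : Nat) : Int) := by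
        exact_mod_cast PySem.Int.floordiv_natCast a 6
      have hm : PySem.Int.mod (a : Int) 6 = ((a % 6 : Nat) : Int) := by
        exact_mod_cast PySem.Int.mod_natCast a 6
      rw [hf, hm, ih (a / 6) (Nat.div_lt_self hpos (by norm_num))]
      simp

theorem padRep_succ_low (k : Nat) : ∀ m : Nat,
    padRep (k + 1) m = padRep k (m / 6) ++ PySem.Int.toChars ((m % 6 : Nat) : Int) := by
  induction k with
  | zero =>
    intro m
    show PySem.Int.toChars ((m / 6 ^ 1 : Nat) : Int) ++ PySem.Int.toChars ((m % 6 ^ 1 : Nat) : Int) = _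
    simp [padRep, pow_one]
  | succ k ih =>
    intro m
    show PySem.Int.toChars ((m / 6 ^ (k + 2) : Nat) : Int) ++ padRep (k + 1) (m % 6 ^ (k + 2)) = _
    rw [ih (m % 6 ^ (k + 2))]
    show _ = PySem.Int.toChars ((m / 6 / 6 ^ (k + 1) : Nat) : Int) ++
      padRep k (m / 6 % 6 ^ (k + 1)) ++ PySem.Int.toChars ((m % 6 : Nat) : Int)
    have e1 : m / 6 / 6 ^ (k + 1) = m / 6 ^ (k + 2) := by
      rw [Nat.div_div_eq_div_mul, ← pow_succ']
    have e2 : m % 6 ^ (k + 2) / 6 = m / 6 % 6 ^ (k + 1) := by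
      have : (6 : Nat) ^ (k + 2) = 6 * 6 ^ (k + 1) := by ring
      rw [this, Nat.mod_mul_right_div_self]
    have e3 : m % 6 ^ (k + 2) % 6 = m % 6 := by
      apply Nat.mod_mod_of_dvd
      exact ⟨6 ^ (k + 1), by ring⟩
    rw [e1, e2, e3, List.append_assoc]

theorem rep_split (k : Nat) : ∀ a b : Nat, 0 < a → b < 6 ^ (k + 1) →
    rep (a * 6 ^ (k + 1) + b) = rep a ++ padRep k b := by
  induction k with
  | zero =>
    intro a b ha hb
    rw [pow_one] at *
    rw [rep]
    have hne : a * 6 + b ≠ 0 := by omega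
    rw [dif_neg hne]
    have e1 : (a * 6 + b) / 6 = a := by omega
    have e2 : (a * 6 + b) % 6 = b := by omega
    rw [e1, e2]
    rfl
  | succ k ih =>
    intro a b ha hb
    rw [rep]
    have hne : a * 6 ^ (k + 2) + b ≠ 0 := by
      have : 0 < a * 6 ^ (k + 2) + b := by positivity
      omega
    rw [dif_neg hne]
    have h62 : (6 : Nat) ^ (k + 2) = 6 ^ (k + 1) * 6 := by ring
    have e1 : (a * 6 ^ (k + 2) + b) / 6 = a * 6 ^ (k + 1) + b / 6 := by
      rw [h62, ← mul_assoc]; omega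
    have e2 : (a * 6 ^ (k + 2) + b) % 6 = b % 6 := by
      rw [h62, ← mul_assoc]; omega
    have hb6 : b / 6 < 6 ^ (k + 1) := by
      rw [h62] at hb; omega
    rw [e1, e2, ih a (b / 6) ha hb6, padRep_succ_low, List.append_assoc]

theorem rep_eq_padRep (k m : Nat) (h1 : 6 ^ k ≤ m) (h2 : m < 6 ^ (k + 1)) :
    rep m = padRep k m := by
  cases k with
  | zero =>
    rw [pow_one] at h2
    rw [rep, dif_neg (by omega), rep, dif_pos (by omega)]
    simp [padRep, Nat.mod_eq_of_lt h2]
  | succ k =>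
    have h66 : (6 : Nat) ^ (k + 2) = 6 ^ (k + 1) * 6 := by ring
    set a := m / 6 ^ (k + 1) with ha
    set b := m % 6 ^ (k + 1) with hb
    have hm : a * 6 ^ (k + 1) + b = m := by
      rw [ha, hb, mul_comm]; exact Nat.div_add_mod m _
    have hb1 : b < 6 ^ (k + 1) := Nat.mod_lt _ (by positivity)
    have ha0 : 0 < a := Nat.one_le_div_iff (by positivity) |>.mpr h1
    have ha6 : a < 6 := by
      rw [ha]
      rw [h66] at h2
      exact Nat.div_lt_of_lt_mul (by omega)
    rw [show padRep (k + 1) m = PySem.Int.toChars ((a : Nat) : Int) ++ padRep k b from rfl]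
    rw [← hm, rep_split k a b ha0 hb1]
    congr 1
    rw [rep, dif_neg (by omega), rep, dif_pos (by omega)]
    simp [Nat.mod_eq_of_lt ha6]

theorem extractLoop_eq_padRep (k : Nat) : ∀ (m : Nat) (acc : List (List Char)),
    m < 6 ^ (k + 1) →
    (extractLoop ((6 ^ k : Nat) : Int) (m : Int) acc).flatten = acc.flatten ++ padRep k m := by
  induction k with
  | zero =>
    intro m acc hm
    rw [extractLoop, dif_pos (by norm_num)]
    have hf1 : PySem.Int.floordiv ((6 ^ 0 : Nat) : Int) 6 = ((0 : Nat) : Int) := by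
      exact_mod_cast PySem.Int.floordiv_natCast (6 ^ 0) 6
    have hf2 : PySem.Int.mod (m : Int) ((6 ^ 0 : Nat) : Int) = ((m % 1 : Nat) : Int) := by
      exact_mod_cast PySem.Int.mod_natCast m 1
    have hf3 : PySem.Int.floordiv (m : Int) ((6 ^ 0 : Nat) : Int) = ((m / 1 : Nat) : Int) := by
      exact_mod_cast PySem.Int.floordiv_natCast m 1
    rw [hf1, hf2, hf3, extractLoop, dif_neg (by norm_num)]
    simp [padRep]
  | succ k ih =>
    intro m acc hm
    rw [extractLoop, dif_pos (by positivity)]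
    have hf1 : PySem.Int.floordiv ((6 ^ (k + 1) : Nat) : Int) 6 = ((6 ^ k : Nat) : Int) := by
      have : (6 : Nat) ^ (k + 1) / 6 = 6 ^ k := by
        rw [pow_succ, Nat.mul_div_cancel _ (by norm_num)]
      calc PySem.Int.floordiv ((6 ^ (k + 1) : Nat) : Int) 6
          = ((6 ^ (k + 1) / 6 : Nat) : Int) := by
            exact_mod_cast PySem.Int.floordiv_natCast (6 ^ (k + 1)) 6
        _ = ((6 ^ k : Nat) : Int) := by rw [this]
    have hf2 : PySem.Int.mod (m : Int) ((6 ^ (k + 1) : Nat) : Int)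
        = ((m % 6 ^ (k + 1) : Nat) : Int) := PySem.Int.mod_natCast m (6 ^ (k + 1))
    have hf3 : PySem.Int.floordiv (m : Int) ((6 ^ (k + 1) : Nat) : Int)
        = ((m / 6 ^ (k + 1) : Nat) : Int) := PySem.Int.floordiv_natCast m (6 ^ (k + 1))
    rw [hf1, hf2, hf3, ih (m % 6 ^ (k + 1)) _ (Nat.mod_lt _ (by positivity))]
    simp [padRep]

theorem powLoop_aux (N : Nat) : ∀ (p m : Int) (hp : 0 < p), p ≤ m → (m + 1 - p).toNat ≤ N →
    ∃ k : Nat, powLoop p m hp = p * 6 ^ k ∧ p * 6 ^ k ≤ m ∧ m < p * 6 ^ (k + 1) := by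
  induction N with
  | zero => intro p m hp hpm hN; omega
  | succ N ih =>
    intro p m hp hpm hN
    by_cases hle : p * 6 ≤ m
    · obtain ⟨k, hk1, hk2, hk3⟩ := ih (p * 6) m (by omega) hle (by omega)
      refine ⟨k + 1, ?_, ?_, ?_⟩
      · rw [powLoop, if_pos hle, hk1]; ring
      · calc p * 6 ^ (k + 1) = p * 6 * 6 ^ k := by ring
          _ ≤ m := hk2
      · calc m < p * 6 * 6 ^ (k + 1) := hk3
          _ = p * 6 ^ (k + 2) := by ring
    · refine ⟨0, ?_, by simpa using hpm, ?_⟩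
      · rw [powLoop, if_neg hle]; ring
      · simpa using by omega

theorem powLoop_spec (p m : Int) (hp : 0 < p) (hpm : p ≤ m) :
    ∃ k : Nat, powLoop p m hp = p * 6 ^ k ∧ p * 6 ^ k ≤ m ∧ m < p * 6 ^ (k + 1) :=
  powLoop_aux (m + 1 - p).toNat p m hp hpm le_rfl

-- ===== VERDICT (by name: the statement is the Claim_ definition above) =====
theorem getSpecialNumber_spec : Claim_equal_getSpecialNumber := by
  intro n _
  simp only [Spec_getSpecialNumber, getSpecialNumber, getSpecialNumber_alt]
  set m := n - 1 with hmdef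
  by_cases h0 : m < 0
  · rw [if_pos h0, if_pos (show m ≤ 0 by omega)]
  · rcases eq_or_lt_of_le (not_lt.mp h0) with he | hpos
    · -- m = 0 : A's loop body never runs, result is ""; B returns 0 directly
      have hz : aLoop m [] = [] := by
        have h := aLoop_eq_rep 0 []
        rw [rep, dif_pos rfl] at h
        simpa [← he] using h
      rw [if_neg h0, if_pos (show m ≤ 0 by omega), hz, if_neg (by simp)]
    · -- m > 0 : both sides produce the base-6 digit string of m
      have ha : ((m.toNat : Nat) : Int) = m := Int.toNat_of_nonneg (by omega)
      set a := m.toNat with hadef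
      have hapos : 0 < a := by omega
      obtain ⟨k, hk1, hk2, hk3⟩ := powLoop_spec 1 m (by norm_num) (by omega)
      rw [one_mul] at hk1 hk2 hk3
      have c1 : ((6 ^ k : Nat) : Int) = (6 : Int) ^ k := by push_cast; ring
      have c2 : ((6 ^ (k + 1) : Nat) : Int) = (6 : Int) ^ (k + 1) := by push_cast; ring
      have hA : (6 : Nat) ^ k ≤ a := by omega
      have hB : a < 6 ^ (k + 1) := by omega
      have hpk : powLoop 1 m (by norm_num) = ((6 ^ k : Nat) : Int) := by rw [hk1, c1]
      rw [if_neg h0, if_neg (show ¬ m ≤ 0 by omega), hpk, ← ha, aLoop_eq_rep a [],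
        extractLoop_eq_padRep k a [] hB, rep_eq_padRep k a hA hB]
      simp only [List.append_nil, List.flatten_nil, List.nil_append]
      by_cases hnil : padRep k a = []
      · rw [if_neg (by simp [hnil]), hnil]
        decide
      · rw [if_pos (by simp [hnil])]
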